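-- pv_equiv track=rewrite | github.com/mattwhitesides/CS5200 | Exam/2/Zip/Prob5bHuff.py | build_freq_tups
-- ===== SOURCE A (Python) =====
-- def build_freq_tups(A):
--     f = {}
--     for c in A:
--         if (c in f):
--             f[c] += 1
--         else:
--             f[c] = 1
--
--     characters = f.keys()
--     tuples = []
--     for c in characters:
--         tuples.append((f[c], c))
--     return tuples
-- ===== SOURCE B (Python) =====
-- def build_freq_tups(A):
--     items = list(A)
--     if not items:
--         return []
--     c = items[0]
--     rest = [x for x in items if x != c]
--     return [(len(items) - len(rest), c)] + build_freq_tups(rest)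
-- ===== Notes on version B (the rewrite author's own statement) =====
-- stated objective: alternative
-- what changed: Replaces A's incremental counting dict with a recursive partition: take the first character, obtain its count as the length drop after filtering all its occurrences out, and recurse on the filtered remainder, so no dictionary or lookup structure is maintained at all.
import Mathlib
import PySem

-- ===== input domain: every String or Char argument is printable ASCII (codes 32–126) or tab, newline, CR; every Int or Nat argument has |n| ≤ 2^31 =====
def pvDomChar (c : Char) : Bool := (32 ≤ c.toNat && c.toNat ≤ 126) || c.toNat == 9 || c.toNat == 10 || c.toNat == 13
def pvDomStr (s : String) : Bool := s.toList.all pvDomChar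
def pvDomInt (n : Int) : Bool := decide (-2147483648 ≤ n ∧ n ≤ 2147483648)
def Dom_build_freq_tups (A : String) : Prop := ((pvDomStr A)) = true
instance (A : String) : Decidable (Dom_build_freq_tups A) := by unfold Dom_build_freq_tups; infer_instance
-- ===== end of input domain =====

-- B replaces A's incremental counting dict by a recursive partition: count the first
-- character as the length drop after filtering it out, recurse on the remainder (alternative).

-- ===== PORT A =====
def build_freq_tups (A : String) : List (Int × String) :=
  let f : PySem.Dict Char Int :=
    A.toList.foldl
      (fun d c =>
        if d.contains c then d.insert c (d.getD c 0 + 1)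
        else d.insert c 1)
      PySem.Dict.empty
  f.keys.foldl (fun tuples c => tuples ++ [(f.getD c 0, String.singleton c)]) []

-- ===== PORT B =====
def build_freq_tups_go : List Char → List (Int × String)
  | [] => []
  | c :: t =>
    let items := c :: t
    let rest := items.filter (fun x => decide (x ≠ c))
    ((items.length : Int) - (rest.length : Int), String.singleton c) :: build_freq_tups_go rest
termination_by xs => xs.length
decreasing_by
  simp only [List.filter_cons]
  have := List.length_filter_le (fun x => decide (x ≠ c)) t
  split <;> simp_all

def build_freq_tups_alt (A : String) : List (Int × String) :=
  build_freq_tups_go A.toList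

-- ===== PRECONDITION & SPEC =====
def Spec_build_freq_tups (A : String) (out : List (Int × String)) : Prop := out = build_freq_tups_alt A
instance (A : String) (out : List (Int × String)) : Decidable (Spec_build_freq_tups A out) := by unfold Spec_build_freq_tups; infer_instance

-- ===== CLAIM (what is proved, stated in full; the proofs are below) =====
def Claim_equal_build_freq_tups : Prop := ∀ (A : String), Dom_build_freq_tups A → Spec_build_freq_tups A (build_freq_tups A)

-- ===== LEMMAS AND PROOFS =====

-- A's accumulation step is exactly the 'insert (getD + 1)' counting step.
theorem build_step_eq (d : PySem.Dict Char Int) (c : Char) :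
    (if d.contains c then d.insert c (d.getD c 0 + 1) else d.insert c 1)
      = d.insert c (d.getD c 0 + 1) := by
  by_cases h : d.contains c = true
  · simp [h]
  · have hn : d.get? c = none := by
      have := PySem.Dict.contains_eq_isSome_get? d c
      cases hg : d.get? c with
      | none => rfl
      | some v => rw [hg] at this; simp at this; exact absurd this h
    simp [h, PySem.Dict.getD, hn]

theorem build_fold_eq_counter (xs : List Char) :
    xs.foldl (fun d c => if d.contains c then d.insert c (d.getD c 0 + 1) else d.insert c 1)
      PySem.Dict.empty = PySem.Dict.counter xs := by
  rw [← PySem.Dict.foldl_insert_getD_add_one_eq_counter]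
  apply PySem.List.foldl_congr_mem
  intro d c _
  exact build_step_eq d c

-- adding to a set already containing c skips further c's
theorem foldl_add_filter (t : List Char) : ∀ (s : PySem.Set Char), c ∈ s →
    List.foldl PySem.Set.add s t
      = List.foldl PySem.Set.add s (t.filter (fun x => decide (x ≠ c))) := by
  induction t with
  | nil => intro s _; rfl
  | cons x t ih =>
    intro s hc
    by_cases hx : x = c
    · subst hx
      have : PySem.Set.add s x = s := by
        simp [PySem.Set.add, List.contains_eq_mem, hc]
      simp only [List.foldl_cons, List.filter_cons, decide_not]
      simp only [this]
      rw [ih s hc]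
      simp
    · have hmem : c ∈ PySem.Set.add s x := by
        simp [PySem.Set.add]; split <;> simp [hc]
      simp only [List.foldl_cons, List.filter_cons]
      have : (decide ¬x = c) = true := by simp [hx]
      rw [this]
      simpa using ih (PySem.Set.add s x) hmem

-- pulling a fresh head out of a Set.ofList fold
theorem foldl_add_cons (l : List Char) : ∀ (s : List Char) (c : Char), c ∉ l →
    List.foldl PySem.Set.add (c :: s) l = c :: List.foldl PySem.Set.add s l := by
  induction l with
  | nil => intro s c _; rfl
  | cons x l ih =>
    intro s c hc
    have hc1 : c ≠ x := by intro h; exact hc (by simp [h])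
    have hc2 : c ∉ l := fun h => hc (by simp [h])
    have hcx : (x == c) = false := by simp [Ne.symm hc1]
    have step : PySem.Set.add (c :: s) x = c :: PySem.Set.add s x := by
      simp only [PySem.Set.add, PySem.Set.contains, List.contains_cons, hcx, Bool.false_or]
      split <;> simp
    simp only [List.foldl_cons, step]
    exact ih _ c hc2

theorem dedup_cons_filter (c : Char) (t : List Char) :
    PySem.List.dedup (c :: t)
      = c :: PySem.List.dedup (t.filter (fun x => decide (x ≠ c))) := by
  simp only [PySem.List.dedup, PySem.Set.ofList, List.foldl_cons]
  have h0 : PySem.Set.add PySem.Set.empty c = [c] := by rfl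
  rw [h0, foldl_add_filter (c := c) t [c] (by simp)]
  exact foldl_add_cons _ [] c (by simp)

-- B's recursion computes the dedup/count map form.
theorem go_eq_map : ∀ (xs : List Char),
    build_freq_tups_go xs
      = (PySem.List.dedup xs).map (fun c => ((xs.count c : Int), String.singleton c))
  | [] => by
    simp [build_freq_tups_go, PySem.List.dedup, PySem.Set.ofList]
  | c :: t => by
    have hrest : (c :: t).filter (fun x => decide (x ≠ c)) = t.filter (fun x => decide (x ≠ c)) := by
      simp
    have ih := go_eq_map ((c :: t).filter (fun x => decide (x ≠ c)))
    rw [hrest] at ih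
    rw [build_freq_tups_go, dedup_cons_filter, List.map_cons]
    congr 1
    · -- head: count c (c::t) = length (c::t) - length rest
      have hsplit := List.length_eq_countP_add_countP (p := fun x => decide (x ≠ c)) (l := t)
      have hf : (t.filter (fun x => decide (x ≠ c))).length = t.countP (fun x => decide (x ≠ c)) :=
        List.countP_eq_length_filter.symm
      have hcnt : t.countP (fun a => decide (¬decide (a ≠ c) = true)) = t.count c := by
        unfold List.count
        apply List.countP_congr
        intro x _
        by_cases h : x = c <;> simp [h]
      rw [hrest]
      simp only [Prod.mk.injEq, List.count_cons_self, List.length_cons]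
      refine ⟨?_, trivial⟩
      push_cast
      omega
    · -- tail: counts agree on every element of the filtered remainder's dedup
      rw [hrest, ih]
      apply List.map_congr_left
      intro x hx
      have hxne : x ≠ c := by
        have hmem := (PySem.List.mem_dedup _ x).mp hx
        simp at hmem
        exact hmem.2
      have hcount : (t.filter (fun x => decide (x ≠ c))).count x = (c :: t).count x := by
        rw [List.count_filter (by simp [hxne])]
        simp [Ne.symm hxne]
      rw [hcount]
termination_by xs => xs.length
decreasing_by
  simp only [List.filter_cons]
  have := List.length_filter_le (fun x => decide (x ≠ c)) t
  split <;> simp_all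

-- ===== VERDICT (by name: the statement is the Claim_ definition above) =====
theorem build_freq_tups_spec : Claim_equal_build_freq_tups := by
  intro A _
  show build_freq_tups A = build_freq_tups_alt A
  unfold build_freq_tups build_freq_tups_alt
  rw [build_fold_eq_counter, go_eq_map]
  rw [PySem.List.foldl_append_singleton_eq_map]
  simp [PySem.Dict.keys_counter, PySem.Dict.getD_counter, PySem.List.dedup_eq_ofList]
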